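-- pv_equiv track=rewrite | github.com/mugiwara4149/Email-Spam-Detection | New/Email_Spam_Detaction.py | extract_features
-- ===== SOURCE A (Python) =====
-- def extract_features(text):
--     return {
--         "length": len(text),
--         "num_excl": text.count("!"),
--         "num_caps": sum(1 for c in text if c.isupper()),
--         "num_digits": sum(1 for c in text if c.isdigit()),
--         "has_free": int("free" in text.lower()),
--         "has_urgent": int("urgent" in text.lower()),
--         "has_win": int("win" in text.lower())
--     }
-- ===== SOURCE B (Python) =====
-- UPPERS = "ABCDEFGHIJKLMNOPQRSTUVWXYZ"
-- DIGITS = "0123456789"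
--
-- def extract_features(text):
--     freq = {}
--     for c in text:
--         freq[c] = freq.get(c, 0) + 1
--     lower = text.lower()
--     return {
--         "length": len(text),
--         "num_excl": freq.get("!", 0),
--         "num_caps": sum(freq.get(c, 0) for c in UPPERS),
--         "num_digits": sum(freq.get(c, 0) for c in DIGITS),
--         "has_free": int("free" in lower),
--         "has_urgent": int("urgent" in lower),
--         "has_win": int("win" in lower),
--     }
-- ===== Notes on version B (the rewrite author's own statement) =====
-- stated objective: alternative
-- what changed: A scans the text once per feature (an exclamation-mark count and two per-character generator sums); B builds a single character-frequency dictionary (histogram) and reads the exclamation count from it directly and num_caps/num_digits by summing the histogram entries of the 26 uppercase letters / 10 digit characters, so no per-feature scan of the text remains; keyword flags stay substring checks on one cached lower().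
import Mathlib
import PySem

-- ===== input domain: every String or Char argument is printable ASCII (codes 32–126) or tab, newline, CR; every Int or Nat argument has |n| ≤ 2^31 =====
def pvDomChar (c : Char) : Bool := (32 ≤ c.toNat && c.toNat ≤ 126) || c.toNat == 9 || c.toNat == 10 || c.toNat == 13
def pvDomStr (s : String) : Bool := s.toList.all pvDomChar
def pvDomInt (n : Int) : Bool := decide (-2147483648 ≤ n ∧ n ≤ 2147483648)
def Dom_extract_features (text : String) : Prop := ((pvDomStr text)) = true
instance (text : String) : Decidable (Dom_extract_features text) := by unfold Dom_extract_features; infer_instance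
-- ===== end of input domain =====

-- B replaces A's per-feature scans of the text by one character-frequency dictionary (histogram):
-- num_excl is the histogram entry of '!', num_caps/num_digits are sums of the histogram entries of
-- the 26 uppercase letters / 10 digit characters; same return value, different data structure.

-- ===== PORT A =====
def extract_features (text : String) : List (String × Int) :=
  [("length", (PySem.Str.len text : Int)),
   ("num_excl", (PySem.Str.count text "!" : Int)),
   ("num_caps", ((text.toList.filter (fun c => PySem.Chars.isupper c)).map (fun _ => (1 : Int))).sum),
   ("num_digits", ((text.toList.filter (fun c => PySem.Chars.isdigit c)).map (fun _ => (1 : Int))).sum),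
   ("has_free", if PySem.Str.isIn "free" (PySem.Str.lower text) then 1 else 0),
   ("has_urgent", if PySem.Str.isIn "urgent" (PySem.Str.lower text) then 1 else 0),
   ("has_win", if PySem.Str.isIn "win" (PySem.Str.lower text) then 1 else 0)]

-- ===== PORT B =====
def pvUPPERS : String := "ABCDEFGHIJKLMNOPQRSTUVWXYZ"
def pvDIGITS : String := "0123456789"

def extract_features_alt (text : String) : List (String × Int) :=
  let freq : PySem.Dict Char Int :=
    text.toList.foldl (fun d c => d.insert c (d.getD c 0 + 1)) PySem.Dict.empty
  let lower := PySem.Str.lower text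
  [("length", (PySem.Str.len text : Int)),
   ("num_excl", freq.getD '!' 0),
   ("num_caps", (pvUPPERS.toList.map (fun c => freq.getD c 0)).sum),
   ("num_digits", (pvDIGITS.toList.map (fun c => freq.getD c 0)).sum),
   ("has_free", if PySem.Str.isIn "free" lower then 1 else 0),
   ("has_urgent", if PySem.Str.isIn "urgent" lower then 1 else 0),
   ("has_win", if PySem.Str.isIn "win" lower then 1 else 0)]

-- ===== PRECONDITION & SPEC =====
def Spec_extract_features (text : String) (out : List (String × Int)) : Prop := out = extract_features_alt text
instance (text : String) (out : List (String × Int)) : Decidable (Spec_extract_features text out) := by unfold Spec_extract_features; infer_instance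

-- ===== CLAIM (what is proved, stated in full; the proofs are below) =====
def Claim_equal_extract_features : Prop := ∀ (text : String), Dom_extract_features text → Spec_extract_features text (extract_features text)

-- ===== LEMMAS AND PROOFS =====

-- PySem.Chars.count.go on a single-character needle counts occurrences of that character.
theorem pv_count_go_single (c : Char) (l : List Char) : ∀ (fuel acc : Nat), l.length ≤ fuel →
    PySem.Chars.count.go [c] fuel l acc = acc + l.count c := by
  induction l with
  | nil => intro fuel acc _; cases fuel <;> simp [PySem.Chars.count.go]
  | cons h t ih =>
    intro fuel acc hf
    cases fuel with
    | zero => simp at hf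
    | succ n =>
      rw [PySem.Chars.count.go]
      by_cases hc : h = c
      · subst hc
        simp [List.isPrefixOf, ih n (acc + 1) (by simpa using hf)]
        ring
      · have hp : ([c].isPrefixOf (h :: t)) = false := by
          simp [List.isPrefixOf]
          exact fun e => hc (Eq.symm e)
        simp only [hp, Bool.false_eq_true, if_false, ih n acc (by simpa using hf),
          List.count_cons]
        simp [hc]

theorem pv_count_single (c : Char) (l : List Char) :
    PySem.Chars.count l [c] = l.count c := by
  simp [PySem.Chars.count, pv_count_go_single c l l.length 0 le_rfl]

-- A's generator-sum counts via filter; identify it with countP.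
theorem pv_sum_ones (p : Char → Bool) (l : List Char) :
    ((l.filter p).map (fun _ => (1 : Int))).sum = (l.countP p : Int) := by
  simp [List.countP_eq_length_filter]

theorem pv_sum_map_add (l : List Char) (f g : Char → Int) :
    (l.map (fun x => f x + g x)).sum = (l.map f).sum + (l.map g).sum := by
  induction l with
  | nil => simp
  | cons h t ih => simp [ih]; ring

-- Sum of the indicator of h over a duplicate-free list is its membership indicator.
theorem pv_sum_indicator (h : Char) (cs : List Char) (hnd : cs.Nodup) :
    (cs.map (fun c => ((if h = c then 1 else 0) : Int))).sum
      = if h ∈ cs then 1 else 0 := by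
  induction cs with
  | nil => simp
  | cons c t ih =>
    have hnd' : t.Nodup := hnd.of_cons
    by_cases hc : h = c
    · subst hc
      have hnm : h ∉ t := (List.nodup_cons.mp hnd).1
      have : (t.map (fun c => ((if h = c then 1 else 0) : Int))).sum = 0 := by
        rw [ih hnd']; simp [hnm]
      simp [this]
    · simp [hc, ih hnd', List.mem_cons]

-- Summing per-character counts over a duplicate-free list cs equals countP for any
-- predicate that holds exactly on the members of cs.
theorem pv_sum_counts (cs : List Char) (hnd : cs.Nodup) (p : Char → Bool)
    (hp : ∀ c, p c = true ↔ c ∈ cs) (l : List Char) :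
    (cs.map (fun c => (l.count c : Int))).sum = (l.countP p : Int) := by
  induction l with
  | nil => simp
  | cons h t ih =>
    have hcnt : ∀ c : Char, ((h :: t).count c : Int)
        = (t.count c : Int) + (if h = c then 1 else 0) := by
      intro c
      by_cases hc : h = c <;> simp [hc]
    calc (cs.map (fun c => ((h :: t).count c : Int))).sum
        = (cs.map (fun c => (t.count c : Int) + (if h = c then 1 else 0))).sum := by
          simp only [hcnt]
      _ = (cs.map (fun c => (t.count c : Int))).sum
          + (cs.map (fun c => ((if h = c then 1 else 0) : Int))).sum :=
          pv_sum_map_add cs _ _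
      _ = (t.countP p : Int) + (if h ∈ cs then 1 else 0) := by
          rw [ih, pv_sum_indicator h cs hnd]
      _ = ((h :: t).countP p : Int) := by
          rw [List.countP_cons]
          by_cases hph : p h = true
          · simp [hph, (hp h).mp hph]
          · have : h ∉ cs := fun hm => hph ((hp h).mpr hm)
            simp [hph, this]

-- isupper / isdigit hold exactly on the uppercase-letter / digit alphabets.
theorem pv_mem_map_toNat (c : Char) (L : List Char) :
    c ∈ L ↔ c.toNat ∈ L.map Char.toNat := by
  rw [List.mem_map]
  constructor
  · intro h; exact ⟨c, h, rfl⟩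
  · rintro ⟨d, hd, he⟩
    have : d = c := Char.ext (UInt32.toNat_inj.mp he)
    rwa [this] at hd

theorem pv_isupper_mem (c : Char) :
    PySem.Chars.isupper c = true ↔ c ∈ pvUPPERS.toList := by
  rw [pv_mem_map_toNat,
    show (pvUPPERS.toList.map Char.toNat)
      = [65,66,67,68,69,70,71,72,73,74,75,76,77,78,79,80,
         81,82,83,84,85,86,87,88,89,90] from by decide]
  simp only [PySem.Chars.isupper, Bool.and_eq_true, decide_eq_true_eq,
    Char.le_def, UInt32.le_iff_toNat_le,
    show ('A'.val.toNat = 65) from rfl, show ('Z'.val.toNat = 90) from rfl,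
    List.mem_cons, List.not_mem_nil, or_false]
  show 65 ≤ c.toNat ∧ c.toNat ≤ 90 ↔ _
  omega

theorem pv_isdigit_mem (c : Char) :
    PySem.Chars.isdigit c = true ↔ c ∈ pvDIGITS.toList := by
  rw [pv_mem_map_toNat,
    show (pvDIGITS.toList.map Char.toNat)
      = [48,49,50,51,52,53,54,55,56,57] from by decide]
  simp only [PySem.Chars.isdigit, Bool.and_eq_true, decide_eq_true_eq,
    Char.le_def, UInt32.le_iff_toNat_le,
    show ('0'.val.toNat = 48) from rfl, show ('9'.val.toNat = 57) from rfl,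
    List.mem_cons, List.not_mem_nil, or_false]
  show 48 ≤ c.toNat ∧ c.toNat ≤ 57 ↔ _
  omega

theorem pv_uppers_nodup : pvUPPERS.toList.Nodup := by decide
theorem pv_digits_nodup : pvDIGITS.toList.Nodup := by decide

-- ===== VERDICT (by name: the statement is the Claim_ definition above) =====
theorem extract_features_spec : Claim_equal_extract_features := by
  intro text _
  unfold Spec_extract_features extract_features extract_features_alt
  simp only [PySem.Dict.getD_foldl_insert_add_one, PySem.Dict.getD_empty, zero_add,
    pv_sum_ones]
  rw [pv_sum_counts pvUPPERS.toList pv_uppers_nodup _ pv_isupper_mem,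
      pv_sum_counts pvDIGITS.toList pv_digits_nodup _ pv_isdigit_mem]
  simp [PySem.Str.count, pv_count_single]
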